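-- pv_equiv track=rewrite | github.com/ehmo/sovi | src/sovi/device/service_diagnostics.py | _extract_detail
-- ===== SOURCE A (Python) =====
-- def _extract_detail(log_text: str, needles: tuple[str, ...]) -> str | None:
--     for line in reversed(log_text.splitlines()):
--         stripped = line.strip()
--         if not stripped:
--             continue
--         lower = stripped.lower()
--         if any(needle in lower for needle in needles):
--             return stripped
--     return None
-- ===== SOURCE B (Python) =====
-- def _extract_detail(log_text: str, needles: tuple[str, ...]) -> str | None:
--     # Forward scan keeping the last matching non-empty stripped line; no reversal, no early return.
--     result = None
--     for line in log_text.splitlines():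
--         stripped = line.strip()
--         if not stripped:
--             continue
--         if any(needle in stripped.lower() for needle in needles):
--             result = stripped
--     return result
-- ===== Notes on version B (the rewrite author's own statement) =====
-- stated objective: alternative
-- what changed: Replaces the reversed scan with early return by a single forward pass that maintains a 'last match' accumulator and never reverses or exits early.
import Mathlib
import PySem

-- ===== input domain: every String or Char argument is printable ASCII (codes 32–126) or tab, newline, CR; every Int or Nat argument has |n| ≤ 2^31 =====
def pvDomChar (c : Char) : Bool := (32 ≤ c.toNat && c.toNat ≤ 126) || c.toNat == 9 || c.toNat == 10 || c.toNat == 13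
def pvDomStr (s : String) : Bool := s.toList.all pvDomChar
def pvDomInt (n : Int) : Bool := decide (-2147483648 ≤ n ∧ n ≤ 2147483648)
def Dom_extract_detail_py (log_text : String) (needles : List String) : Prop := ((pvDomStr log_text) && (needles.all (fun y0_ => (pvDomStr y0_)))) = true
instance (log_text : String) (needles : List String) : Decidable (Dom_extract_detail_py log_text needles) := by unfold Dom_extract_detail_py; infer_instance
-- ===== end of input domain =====

-- B changes the decomposition only (forward pass with a last-match accumulator instead of a
-- reversed scan with early return); same cost, same results.

-- ===== PORT A =====
-- A's loop over reversed(splitlines) with early return, as structural recursion.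
def extractGoA (needles : List String) : List String → Option String
  | [] => none
  | line :: rest =>
    let stripped := PySem.Str.strip line
    if stripped = "" then extractGoA needles rest
    else
      let lower := PySem.Str.lower stripped
      if needles.any (fun needle => PySem.Str.isIn needle lower) then some stripped
      else extractGoA needles rest

def extract_detail_py (log_text : String) (needles : List String) : Option String :=
  extractGoA needles (PySem.Str.splitlines log_text).reverse

-- ===== PORT B =====
-- B's forward fold maintaining the last matching stripped line.
def extract_detail_py_alt (log_text : String) (needles : List String) : Option String :=
  (PySem.Str.splitlines log_text).foldl
    (fun result line =>
      let stripped := PySem.Str.strip line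
      if stripped = "" then result
      else if needles.any (fun needle => PySem.Str.isIn needle (PySem.Str.lower stripped)) then
        some stripped
      else result)
    none

-- ===== PRECONDITION & SPEC =====
def Spec_extract_detail_py (log_text : String) (needles : List String) (out : Option String) : Prop := out = extract_detail_py_alt log_text needles
instance (log_text : String) (needles : List String) (out : Option String) : Decidable (Spec_extract_detail_py log_text needles out) := by unfold Spec_extract_detail_py; infer_instance

-- ===== CLAIM (what is proved, stated in full; the proofs are below) =====
def Claim_equal_extract_detail_py : Prop := ∀ (log_text : String) (needles : List String), Dom_extract_detail_py log_text needles → Spec_extract_detail_py log_text needles (extract_detail_py log_text needles)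

-- ===== LEMMAS AND PROOFS =====
lemma extract_fold_eq_goA (needles : List String) (L : List String) :
    L.foldl
      (fun result line =>
        let stripped := PySem.Str.strip line
        if stripped = "" then result
        else if needles.any (fun needle => PySem.Str.isIn needle (PySem.Str.lower stripped)) then
          some stripped
        else result)
      none = extractGoA needles L.reverse := by
  induction L using List.reverseRecOn with
  | nil => rfl
  | append_singleton L x ih =>
    rw [List.foldl_append, List.reverse_append, ih]
    simp only [List.foldl_cons, List.foldl_nil, List.reverse_singleton, List.singleton_append,
      extractGoA]

-- ===== VERDICT (by name: the statement is the Claim_ definition above) =====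
theorem extract_detail_py_spec : Claim_equal_extract_detail_py := by
  intro log_text needles _
  unfold Spec_extract_detail_py extract_detail_py extract_detail_py_alt
  rw [extract_fold_eq_goA]
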